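-- pv_equiv track=rewrite | github.com/bbi-lab/bbi-sciatac-demux | src/test_p5_orientation.py | generate_mismatches
-- ===== SOURCE A (Python) =====
-- import itertools
--
-- def generate_mismatches(sequence, num_mismatches, allow_n=True):
--     """
--     Generate a list of mismatched sequences to a given sequence. Must only contain ATGC.
--     This is heavily based on a biostars answer.
--     Args:
--         sequence (str): The sequence must contain only A, T, G, and C
--         num_mismatches (int): number of mismatches to generate sequences for
--         allow_n (bool): True to allow N bases and False if not
--     Yield:
--     """
--     letters = 'ACGT'
--
--     if allow_n:
--         letters += 'N'
--
--     sequence = sequence.upper()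
--     mismatches = []
--
--     # generate combinations of num_mismatch indices into the sequence
--     for locs in itertools.combinations(range(len(sequence)), num_mismatches):
--         # convert sequence to list of characters
--         sequence_list = [[char] for char in sequence]
--         for loc in locs:
--             orig_char = sequence[loc]
--             # replace target character with list of mismatches
--             sequence_list[loc] = [l for l in letters if l != orig_char]
--
--         # expand lists as cartesian product (and convert list of characters to string)
--         for poss in itertools.product(*sequence_list):
--             mismatches.append(''.join(poss))
--
--     return mismatches
-- ===== SOURCE B (Python) =====
-- import itertools
--
-- def generate_mismatches(sequence, num_mismatches, allow_n=True):
--     letters = 'ACGTN' if allow_n else 'ACGT'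
--     sequence = sequence.upper()
--     out = []
--     for locs in itertools.combinations(range(len(sequence)), num_mismatches):
--         # substitution choices only for the k chosen positions
--         subs = [[l for l in letters if l != sequence[loc]] for loc in locs]
--         # fixed fragments of the sequence around the chosen positions,
--         # with an empty slot after each fragment for the substituted character
--         slots = []
--         prev = 0
--         for loc in locs:
--             slots.append(sequence[prev:loc])
--             slots.append('')
--             prev = loc + 1
--         slots.append(sequence[prev:])
--         for choice in itertools.product(*subs):
--             slots[1::2] = choice
--             out.append(''.join(slots))
--     return out
-- ===== Notes on version B (the rewrite author's own statement) =====
-- stated objective: alternative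
-- what changed: Instead of expanding a length-n list of per-position candidate lists (singletons everywhere except the k mismatch positions) with a full n-way cartesian product and joining each n-tuple, B takes the product only over the k substitution lists and splices each k-choice into the precomputed fixed fragments of the sequence around the chosen positions; Pre_ excludes negative num_mismatches, on which itertools.combinations raises ValueError in both A and B.
import Mathlib
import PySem

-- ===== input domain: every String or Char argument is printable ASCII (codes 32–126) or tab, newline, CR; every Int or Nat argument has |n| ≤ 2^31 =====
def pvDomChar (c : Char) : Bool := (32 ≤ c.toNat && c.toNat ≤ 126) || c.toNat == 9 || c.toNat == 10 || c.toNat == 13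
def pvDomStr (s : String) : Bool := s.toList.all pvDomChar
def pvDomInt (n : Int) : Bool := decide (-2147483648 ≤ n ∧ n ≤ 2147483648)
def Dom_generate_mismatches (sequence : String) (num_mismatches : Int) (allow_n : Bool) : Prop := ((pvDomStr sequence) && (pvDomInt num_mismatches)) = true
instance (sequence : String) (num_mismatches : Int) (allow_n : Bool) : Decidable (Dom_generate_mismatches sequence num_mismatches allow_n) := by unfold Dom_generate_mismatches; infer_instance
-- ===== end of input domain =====

-- B replaces A's full n-way cartesian product over per-position candidate lists (singletons off the
-- mismatch positions) by a product over only the k substitution lists, splicing each choice into the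
-- fixed fragments of the sequence around the chosen positions; same output in the same order
-- (objective: alternative).

-- itertools.product over a list of candidate lists, leftmost factor varying slowest (exact; used by
-- both ports because both Pythons call itertools.product).
def pyProduct {α : Type} : List (List α) → List (List α)
  | [] => [[]]
  | l :: ls => l.flatMap (fun x => (pyProduct ls).map (x :: ·))

-- ===== PORT A =====
def generate_mismatches (sequence : String) (num_mismatches : Int) (allow_n : Bool) : List String :=
  -- letters = 'ACGT'; if allow_n: letters += 'N'
  let letters : List Char := if allow_n then ['A', 'C', 'G', 'T'] ++ ['N'] else ['A', 'C', 'G', 'T']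
  let seq : List Char := (PySem.Str.upper sequence).toList
  -- for locs in itertools.combinations(range(len(sequence)), num_mismatches): …
  -- (Pre_ requires num_mismatches ≥ 0, so .toNat is exact)
  (PySem.List.combinations (List.range seq.length) num_mismatches.toNat).foldl
    (fun mismatches locs =>
      -- sequence_list = [[char] for char in sequence]; then replace each loc's entry
      let sequence_list : List (List Char) :=
        locs.foldl
          (fun sl loc =>
            -- orig_char = sequence[loc]  (loc ∈ range(len(sequence)), so in range: getD is exact)
            let orig_char : Char := seq.getD loc ' '
            sl.set loc (letters.filter (fun l => l ≠ orig_char)))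
          (seq.map (fun c => [c]))
      -- for poss in itertools.product(*sequence_list): mismatches.append(''.join(poss))
      (pyProduct sequence_list).foldl (fun m poss => m ++ [String.mk poss]) mismatches)
    []

-- ===== PORT B =====
-- models 'slots[1::2] = choice' followed by ''.join(slots): replaces the odd-position slots by the
-- chosen characters in order (exact here: len(choice) always equals the number of odd slots)
def setOdd : List (List Char) → List Char → List (List Char)
  | p :: _ :: rest, c :: cs => p :: [c] :: setOdd rest cs
  | s, _ => s

def generate_mismatches_alt (sequence : String) (num_mismatches : Int) (allow_n : Bool) : List String :=
  let letters : List Char := if allow_n then ['A', 'C', 'G', 'T', 'N'] else ['A', 'C', 'G', 'T']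
  let seq : List Char := (PySem.Str.upper sequence).toList
  (PySem.List.combinations (List.range seq.length) num_mismatches.toNat).foldl
    (fun out locs =>
      -- subs = [[l for l in letters if l != sequence[loc]] for loc in locs]  (loc in range: getD exact)
      let subs : List (List Char) :=
        locs.map (fun loc => letters.filter (fun l => l ≠ seq.getD loc ' '))
      -- slots = []; prev = 0; for loc in locs: append sequence[prev:loc] and ''; prev = loc + 1
      -- (sequence[prev:loc] with 0 ≤ prev ≤ loc: drop/take is exact)
      let sp : List (List Char) × Nat :=
        locs.foldl
          (fun sp loc => (sp.1 ++ [(seq.drop sp.2).take (loc - sp.2), []], loc + 1))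
          ([], 0)
      -- slots.append(sequence[prev:])
      let slots : List (List Char) := sp.1 ++ [seq.drop sp.2]
      -- for choice in itertools.product(*subs): slots[1::2] = choice; out.append(''.join(slots))
      (pyProduct subs).foldl
        (fun out choice => out ++ [String.mk (List.flatten (setOdd slots choice))])
        out)
    []

-- ===== PRECONDITION & SPEC =====
-- Pre_ excludes only num_mismatches < 0, on which A raises ValueError (itertools.combinations
-- rejects a negative r); B raises there too.
def Pre_generate_mismatches (sequence : String) (num_mismatches : Int) (allow_n : Bool) : Prop :=
  0 ≤ num_mismatches
instance (sequence : String) (num_mismatches : Int) (allow_n : Bool) : Decidable (Pre_generate_mismatches sequence num_mismatches allow_n) := by unfold Pre_generate_mismatches; infer_instance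
def pvWitness_generate_mismatches : String × Int × Bool := ("ac", 1, true)

def Spec_generate_mismatches (sequence : String) (num_mismatches : Int) (allow_n : Bool) (out : List String) : Prop := out = generate_mismatches_alt sequence num_mismatches allow_n
instance (sequence : String) (num_mismatches : Int) (allow_n : Bool) (out : List String) : Decidable (Spec_generate_mismatches sequence num_mismatches allow_n out) := by unfold Spec_generate_mismatches; infer_instance

-- ===== CLAIM (what is proved, stated in full; the proofs are below) =====
def Claim_equal_generate_mismatches : Prop := ∀ (sequence : String) (num_mismatches : Int) (allow_n : Bool), Dom_generate_mismatches sequence num_mismatches allow_n → Pre_generate_mismatches sequence num_mismatches allow_n → Spec_generate_mismatches sequence num_mismatches allow_n (generate_mismatches sequence num_mismatches allow_n)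

-- ===== LEMMAS AND PROOFS =====

-- product of a list of singletons is the single list of their elements
lemma pyProduct_singletons {α : Type} (cs : List α) :
    pyProduct (cs.map (fun c => [c])) = [cs] := by
  induction cs with
  | nil => rfl
  | cons c cs ih => simp [pyProduct, ih]

-- a fold of sets at positions ≥ 1 passes over the head of the list
lemma foldl_set_shift {α : Type} (locs : List Nat) (h : ∀ m ∈ locs, 1 ≤ m)
    (x : α) (sl : List α) (f : Nat → α) :
    locs.foldl (fun sl loc => sl.set loc (f loc)) (x :: sl)
      = x :: locs.foldl (fun sl loc => sl.set (loc - 1) (f loc)) sl := by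
  induction locs generalizing sl with
  | nil => rfl
  | cons l ls ih =>
    obtain ⟨m, rfl⟩ : ∃ m, l = m + 1 := ⟨l - 1, by have := h l (by simp); omega⟩
    simp only [List.foldl_cons, List.set_cons_succ, Nat.add_sub_cancel]
    exact ih (fun a ha => h a (by simp [ha])) _

-- a fold of zip-driven sets at positions ≥ 1 passes over the head of the list
lemma foldl_zip_set_shift {α : Type} (locs : List Nat) (h : ∀ m ∈ locs, 1 ≤ m)
    (ch : List α) (c : α) (cs : List α) :
    (locs.zip ch).foldl (fun cs p => cs.set p.1 p.2) (c :: cs)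
      = c :: ((locs.map (· - 1)).zip ch).foldl (fun cs p => cs.set p.1 p.2) cs := by
  induction locs generalizing ch cs with
  | nil => rfl
  | cons l ls ih =>
    cases ch with
    | nil => rfl
    | cons y yt =>
      obtain ⟨m, rfl⟩ : ∃ m, l = m + 1 := ⟨l - 1, by have := h l (by simp); omega⟩
      simp only [List.zip_cons_cons, List.map_cons, List.foldl_cons, List.set_cons_succ,
        Nat.add_sub_cancel]
      exact ih (fun a ha => h a (by simp [ha])) _ _

-- key lemma: the product of (singletons with the lists g loc written at the positions locs)
-- equals the product of the g-lists alone, each choice written back into cs at those positions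
lemma pyProduct_set_eq (cs : List Char) : ∀ (locs : List Nat) (g : Nat → List Char),
    locs.Pairwise (· < ·) → (∀ m ∈ locs, m < cs.length) →
    pyProduct (locs.foldl (fun sl loc => sl.set loc (g loc)) (cs.map (fun c => [c])))
      = (pyProduct (locs.map g)).map
          (fun ch => (locs.zip ch).foldl (fun l p => l.set p.1 p.2) cs) := by
  induction cs with
  | nil =>
    intro locs g _ hb
    cases locs with
    | nil => rfl
    | cons l ls => exact absurd (hb l (by simp)) (by simp)
  | cons c cs ih =>
    intro locs g hp hb
    cases locs with
    | nil => simp [pyProduct_singletons, pyProduct]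
    | cons l ls =>
      cases l with
      | zero =>
        have hge : ∀ a ∈ ls, 1 ≤ a := by
          intro a ha
          have := List.rel_of_pairwise_cons hp ha
          omega
        have hpair' : (ls.map (· - 1)).Pairwise (· < ·) := by
          rw [List.pairwise_map]
          exact (List.Pairwise.imp_of_mem
            (fun {a b} ha hb hab => by have := hge a ha; omega)) hp.of_cons
        have hb' : ∀ m ∈ ls.map (· - 1), m < cs.length := by
          intro m hm
          simp only [List.mem_map] at hm
          obtain ⟨a, ha, rfl⟩ := hm
          have h1 := hb a (by simp [ha])
          have h2 := hge a ha
          simp only [List.length_cons] at h1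
          omega
        have IH := ih (ls.map (· - 1)) (fun m => g (m + 1)) hpair' hb'
        -- rewrite the tail fold of IH's LHS into the form our LHS has
        have hfold : ∀ (X : List (List Char)),
            (ls.map (· - 1)).foldl (fun sl m => sl.set m (g (m + 1))) X
              = ls.foldl (fun sl loc => sl.set (loc - 1) (g loc)) X := by
          intro X
          rw [List.foldl_map]
          exact PySem.List.foldl_congr_mem _ _ _ _
            (fun acc x hx => by
              have hx1 : x - 1 + 1 = x := by have := hge x hx; omega
              rw [hx1])
        have hmapg : (ls.map (· - 1)).map (fun m => g (m + 1)) = ls.map g := by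
          rw [List.map_map]
          exact List.map_congr_left (fun a ha => by
            have := hge a ha
            simp only [Function.comp_apply]
            congr 1
            omega)
        rw [hfold, hmapg] at IH
        simp only [List.foldl_cons, List.map_cons, List.set_cons_zero]
        rw [foldl_set_shift ls hge]
        show pyProduct (g 0 :: _) = _
        simp only [pyProduct, IH, List.map_flatMap, List.map_map]
        refine List.flatMap_congr (fun x _ => ?_)
        refine List.map_congr_left (fun ch _ => ?_)
        simp only [Function.comp_apply, List.zip_cons_cons, List.foldl_cons, List.set_cons_zero]
        rw [foldl_zip_set_shift ls hge]
      | succ n =>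
        have hge : ∀ a ∈ (n + 1) :: ls, 1 ≤ a := by
          intro a ha
          rcases List.mem_cons.mp ha with rfl | ha
          · omega
          · have := List.rel_of_pairwise_cons hp ha; omega
        have hpair' : (((n + 1) :: ls).map (· - 1)).Pairwise (· < ·) := by
          rw [List.pairwise_map]
          exact (List.Pairwise.imp_of_mem
            (fun {a b} ha hb hab => by have := hge a ha; omega)) hp
        have hb' : ∀ m ∈ ((n + 1) :: ls).map (· - 1), m < cs.length := by
          intro m hm
          simp only [List.mem_map] at hm
          obtain ⟨a, ha, rfl⟩ := hm
          have h1 := hb a ha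
          have h2 := hge a ha
          simp only [List.length_cons] at h1
          omega
        have IH := ih (((n + 1) :: ls).map (· - 1)) (fun m => g (m + 1)) hpair' hb'
        have hfold : ∀ (X : List (List Char)),
            (((n + 1) :: ls).map (· - 1)).foldl (fun sl m => sl.set m (g (m + 1))) X
              = ((n + 1) :: ls).foldl (fun sl loc => sl.set (loc - 1) (g loc)) X := by
          intro X
          rw [List.foldl_map]
          exact PySem.List.foldl_congr_mem _ _ _ _
            (fun acc x hx => by
              have hx1 : x - 1 + 1 = x := by have := hge x hx; omega
              rw [hx1])
        have hmapg : (((n + 1) :: ls).map (· - 1)).map (fun m => g (m + 1))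
            = ((n + 1) :: ls).map g := by
          rw [List.map_map]
          exact List.map_congr_left (fun a ha => by
            have := hge a ha
            simp only [Function.comp_apply]
            congr 1
            omega)
        rw [hfold, hmapg] at IH
        show pyProduct (((n + 1) :: ls).foldl _ (([c]) :: cs.map (fun c => [c]))) = _
        rw [foldl_set_shift _ hge]
        show pyProduct ([c] :: _) = _
        simp only [pyProduct, List.flatMap_cons, List.flatMap_nil, List.append_nil, IH,
          List.map_map]
        refine List.map_congr_left (fun ch _ => ?_)
        simp only [Function.comp_apply]
        rw [foldl_zip_set_shift _ hge]

-- every member of a cartesian product has one element per factor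
lemma pyProduct_length {α : Type} : ∀ (ls : List (List α)) (ch : List α),
    ch ∈ pyProduct ls → ch.length = ls.length := by
  intro ls
  induction ls with
  | nil =>
    intro ch h
    simp only [pyProduct, List.mem_singleton] at h
    simp [h]
  | cons l ls ih =>
    intro ch h
    simp only [pyProduct, List.mem_flatMap, List.mem_map] at h
    obtain ⟨x, _, t, ht, rfl⟩ := h
    simp [ih t ht]

-- the fragments of seq around the positions locs, with an empty slot after each fragment
def mkSlots (seq : List Char) : Nat → List Nat → List (List Char)
  | prev, [] => [seq.drop prev]
  | prev, loc :: rest => (seq.drop prev).take (loc - prev) :: [] :: mkSlots seq (loc + 1) rest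

-- the port's slot-building fold computes mkSlots
lemma build_slots (seq : List Char) : ∀ (locs : List Nat) (acc : List (List Char)) (prev : Nat),
    (locs.foldl (fun sp loc => (sp.1 ++ [(seq.drop sp.2).take (loc - sp.2), []], loc + 1))
        (acc, prev)).1
      ++ [seq.drop (locs.foldl
            (fun sp loc => (sp.1 ++ [(seq.drop sp.2).take (loc - sp.2), []], loc + 1))
            (acc, prev)).2]
      = acc ++ mkSlots seq prev locs := by
  intro locs
  induction locs with
  | nil => intro acc prev; simp [mkSlots]
  | cons loc rest ih =>
    intro acc prev
    simp only [List.foldl_cons]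
    rw [ih]
    simp [mkSlots]

-- mkSlots only reads seq from position prev on
lemma mkSlots_congr (s s' : List Char) : ∀ (locs : List Nat) (p : Nat),
    s.drop p = s'.drop p → (∀ m ∈ locs, p ≤ m) → List.Pairwise (· < ·) locs →
    mkSlots s p locs = mkSlots s' p locs := by
  intro locs
  induction locs with
  | nil => intro p h _ _; simp [mkSlots, h]
  | cons loc rest ih =>
    intro p h hge hp
    have hploc : p ≤ loc := hge loc (by simp)
    have hdrop : s.drop (loc + 1) = s'.drop (loc + 1) := by
      have h1 : (s.drop p).drop (loc + 1 - p) = (s'.drop p).drop (loc + 1 - p) := by rw [h]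
      rw [List.drop_drop, List.drop_drop] at h1
      have he : p + (loc + 1 - p) = loc + 1 := by omega
      rwa [he] at h1
    simp only [mkSlots, h]
    rw [ih (loc + 1) hdrop (fun m hm => List.rel_of_pairwise_cons hp hm) hp.of_cons]

-- a fold of sets preserves the length
lemma length_foldl_set {α : Type} : ∀ (ps : List (Nat × α)) (s : List α),
    (ps.foldl (fun l p => l.set p.1 p.2) s).length = s.length := by
  intro ps
  induction ps with
  | nil => intro s; rfl
  | cons p ps ih => intro s; simp [ih, List.length_set]

-- a fold of sets at positions ≥ n does not change the first n entries
lemma take_foldl_set {α : Type} : ∀ (ps : List (Nat × α)) (n : Nat),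
    (∀ pr ∈ ps, n ≤ pr.1) → ∀ (s : List α),
    (ps.foldl (fun l p => l.set p.1 p.2) s).take n = s.take n := by
  intro ps
  induction ps with
  | nil => intro n _ s; rfl
  | cons p ps ih =>
    intro n h s
    simp only [List.foldl_cons]
    rw [ih n (fun pr hpr => h pr (by simp [hpr])), List.take_set_of_le (h p (by simp))]

-- splicing a choice into the fragments equals writing it into the sequence position by position
lemma flatten_setOdd_mkSlots : ∀ (locs : List Nat) (seq : List Char) (prev : Nat) (ch : List Char),
    List.Pairwise (· < ·) locs → (∀ m ∈ locs, m < seq.length) → (∀ m ∈ locs, prev ≤ m) →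
    ch.length = locs.length →
    List.flatten (setOdd (mkSlots seq prev locs) ch)
      = ((locs.zip ch).foldl (fun l p => l.set p.1 p.2) seq).drop prev := by
  intro locs
  induction locs with
  | nil =>
    intro seq prev ch _ _ _ hlen
    cases ch with
    | nil => simp [mkSlots, setOdd]
    | cons c cs => simp at hlen
  | cons loc rest ih =>
    intro seq prev ch hp hb hge hlen
    cases ch with
    | nil => simp at hlen
    | cons c cs =>
      have hrest_ge : ∀ m ∈ rest, loc + 1 ≤ m := fun m hm => List.rel_of_pairwise_cons hp hm
      have hploc : prev ≤ loc := hge loc (by simp)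
      have hloclen : loc < seq.length := hb loc (by simp)
      have hcongr : mkSlots seq (loc + 1) rest = mkSlots (seq.set loc c) (loc + 1) rest :=
        mkSlots_congr _ _ rest (loc + 1)
          (by rw [List.drop_set_of_lt (by omega)]) hrest_ge hp.of_cons
      have IH := ih (seq.set loc c) (loc + 1) cs hp.of_cons
        (by intro m hm; rw [List.length_set]; exact hb m (by simp [hm]))
        hrest_ge (by simpa using hlen)
      have hXtake : ((rest.zip cs).foldl (fun l p => l.set p.1 p.2) (seq.set loc c)).take (loc + 1)
          = (seq.set loc c).take (loc + 1) :=
        take_foldl_set _ _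
          (fun pr hpr => by have := hrest_ge pr.1 (List.of_mem_zip hpr).1; omega) _
      have hXlen : ((rest.zip cs).foldl (fun l p => l.set p.1 p.2) (seq.set loc c)).length
          = seq.length := by rw [length_foldl_set, List.length_set]
      have hsetdecomp : (seq.set loc c).take (loc + 1) = seq.take loc ++ [c] := by
        rw [List.set_eq_take_append_cons_drop, if_pos hloclen, List.take_append]
        have h1 : (seq.take loc).length = loc := by rw [List.length_take]; omega
        rw [List.take_of_length_le (by omega), h1]
        have h2 : loc + 1 - loc = 1 := by omega
        rw [h2]
        simp
      set X := (rest.zip cs).foldl (fun l p => l.set p.1 p.2) (seq.set loc c) with hX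
      have hXdecomp : X.drop prev = (seq.drop prev).take (loc - prev) ++ c :: X.drop (loc + 1) := by
        conv_lhs => rw [← List.take_append_drop (loc + 1) X]
        rw [List.drop_append_of_le_length (by rw [List.length_take]; omega)]
        rw [hXtake, hsetdecomp]
        rw [List.drop_append_of_le_length (by rw [List.length_take]; omega)]
        rw [List.drop_take]
        simp
      show List.flatten (setOdd ((seq.drop prev).take (loc - prev) :: [] :: mkSlots seq (loc + 1) rest) (c :: cs)) = _
      simp only [setOdd, hcongr, List.flatten_cons, IH]
      rw [List.zip_cons_cons, List.foldl_cons]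
      rw [hXdecomp]
      simp

-- ===== VERDICT (by name: the statement is the Claim_ definition above) =====
theorem generate_mismatches_spec : Claim_equal_generate_mismatches := by
  intro sequence num_mismatches allow_n _ _
  unfold Spec_generate_mismatches generate_mismatches generate_mismatches_alt
  have hlet : (if allow_n then (['A', 'C', 'G', 'T'] ++ ['N']) else ['A', 'C', 'G', 'T'])
      = (if allow_n then ['A', 'C', 'G', 'T', 'N'] else ['A', 'C', 'G', 'T']) := by
    cases allow_n <;> rfl
  rw [hlet]
  set letters : List Char := if allow_n then ['A', 'C', 'G', 'T', 'N'] else ['A', 'C', 'G', 'T']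
  set seq : List Char := (PySem.Str.upper sequence).toList with hseq
  refine PySem.List.foldl_congr_mem _ _ _ _ (fun acc locs hmem => ?_)
  have hsub := PySem.List.sublist_of_mem_combinations hmem
  have hpair : locs.Pairwise (· < ·) := List.Pairwise.sublist hsub List.pairwise_lt_range
  have hbnd : ∀ m ∈ locs, m < seq.length := fun m hm => List.mem_range.mp (hsub.subset hm)
  have hkey := pyProduct_set_eq seq locs
    (fun loc => letters.filter (fun l => l ≠ seq.getD loc ' ')) hpair hbnd
  have hslots := build_slots seq locs [] 0
  simp only [List.nil_append] at hslots
  simp only [PySem.List.foldl_append_singleton_eq_map, hkey, List.map_map, hslots]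
  refine congrArg (acc ++ ·) (List.map_congr_left (fun ch hch => ?_))
  have hchlen : ch.length = locs.length := by
    rw [pyProduct_length _ ch hch, List.length_map]
  have hL := flatten_setOdd_mkSlots locs seq 0 ch hpair hbnd (fun m _ => Nat.zero_le m) hchlen
  simp only [List.drop_zero] at hL
  simp [hL]
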